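-- pv_equiv track=rewrite | github.com/domeej/prog3_18 | python/onlinetest/ws1617/a2.py | mal123
-- ===== SOURCE A (Python) =====
-- def mal123(g):
--     for e in list(g):
--         if e % 2 == 0:
--             yield e
--             yield e
--         if e % 2 != 0:
--             yield e
--             yield e
--             yield e
-- ===== SOURCE B (Python) =====
-- def mal123(g):
--     xs = list(g)
--     # staged: derive per-element repeat counts, preallocate the exact-size
--     # output buffer, then fill it by slice assignment at computed offsets
--     counts = [2 + e % 2 for e in xs]
--     out = [0] * sum(counts)
--     pos = 0
--     for e, c in zip(xs, counts):
--         out[pos:pos + c] = [e] * c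
--         pos += c
--     yield from out
-- ===== Notes on version B (the rewrite author's own statement) =====
-- stated objective: alternative
-- what changed: Instead of branching on parity and yielding copies on the fly, B first computes a branch-free count array (2 + e % 2), preallocates the exact-size output buffer, and fills it by slice assignment at computed offsets before yielding it.
import Mathlib
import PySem

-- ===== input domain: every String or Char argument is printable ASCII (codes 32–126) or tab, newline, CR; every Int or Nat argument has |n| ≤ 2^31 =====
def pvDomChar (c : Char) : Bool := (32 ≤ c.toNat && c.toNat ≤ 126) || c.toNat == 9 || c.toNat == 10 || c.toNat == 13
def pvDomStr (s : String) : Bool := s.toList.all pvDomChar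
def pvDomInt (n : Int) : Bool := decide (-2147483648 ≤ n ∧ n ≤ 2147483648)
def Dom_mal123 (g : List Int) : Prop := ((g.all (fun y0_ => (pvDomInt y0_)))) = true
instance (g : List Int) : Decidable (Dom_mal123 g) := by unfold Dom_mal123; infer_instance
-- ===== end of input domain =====

-- B replaces the on-the-fly parity branches by a staged count-array / preallocated-buffer fill; same values, same cost.

-- ===== PORT A =====
-- A: generator with two parity branches and hard-coded yields; a left fold over the list
def mal123 (g : List Int) : List Int :=
  g.foldl (fun acc e =>
    let acc := if PySem.Int.mod e 2 = 0 then acc ++ [e, e] else acc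
    if PySem.Int.mod e 2 ≠ 0 then acc ++ [e, e, e] else acc) []

-- ===== PORT B =====
-- B: counts = [2 + e % 2 …]; out = [0] * sum(counts); fill out by slice assignment at offset pos
def mal123_alt (g : List Int) : List Int :=
  let counts := g.map (fun e => 2 + PySem.Int.mod e 2)
  let out : List Int := List.replicate (counts.foldl (· + ·) 0).toNat 0
  ((g.zip counts).foldl
    (fun (st : List Int × Nat) p =>
      let repl := List.replicate p.2.toNat p.1
      (st.1.take st.2 ++ repl ++ st.1.drop (st.2 + p.2.toNat), st.2 + p.2.toNat))
    (out, 0)).1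

-- ===== PRECONDITION & SPEC =====
def Spec_mal123 (g : List Int) (out : List Int) : Prop := out = mal123_alt g
instance (g : List Int) (out : List Int) : Decidable (Spec_mal123 g out) := by unfold Spec_mal123; infer_instance

-- ===== CLAIM (what is proved, stated in full; the proofs are below) =====
def Claim_equal_mal123 : Prop := ∀ (g : List Int), Dom_mal123 g → Spec_mal123 g (mal123 g)

-- ===== LEMMAS AND PROOFS =====

-- common normal form: each element repeated (2 + e % 2) times
def pvF (g : List Int) : List Int :=
  g.flatMap (fun e => List.replicate (2 + PySem.Int.mod e 2).toNat e)

theorem pvMod2 (e : Int) : PySem.Int.mod e 2 = 0 ∨ PySem.Int.mod e 2 = 1 := by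
  have h1 := PySem.Int.mod_nonneg e (b := 2) (by omega)
  have h2 := PySem.Int.mod_lt e (b := 2) (by omega)
  omega

-- A equals the normal form
theorem mal123_foldl (g : List Int) (acc : List Int) :
    g.foldl (fun acc e =>
      let acc := if PySem.Int.mod e 2 = 0 then acc ++ [e, e] else acc
      if PySem.Int.mod e 2 ≠ 0 then acc ++ [e, e, e] else acc) acc
    = acc ++ pvF g := by
  induction g generalizing acc with
  | nil => simp [pvF]
  | cons e t ih =>
    simp only [List.foldl_cons]
    rw [ih]
    by_cases h : PySem.Int.mod e 2 = 0
    · rw [if_pos h, if_neg (by simpa using h)]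
      have h2 : (2 + PySem.Int.mod e 2).toNat = 2 := by rw [h]; rfl
      simp only [pvF, List.flatMap_cons, h2]
      simp [List.replicate]
    · have h1 : PySem.Int.mod e 2 = 1 := (pvMod2 e).resolve_left h
      rw [if_neg h, if_pos h]
      have h2 : (2 + PySem.Int.mod e 2).toNat = 3 := by rw [h1]; rfl
      simp only [pvF, List.flatMap_cons, h2]
      simp [List.replicate]

-- the Int sum of counts, and its agreement with the Nat length of pvF
def pvS (g : List Int) : Int := ((g.map (fun e => 2 + PySem.Int.mod e 2)).foldl (· + ·) 0)

theorem pvS_foldl (g : List Int) (c : Int) :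
    (g.map (fun e => 2 + PySem.Int.mod e 2)).foldl (· + ·) c = c + pvS g := by
  induction g generalizing c with
  | nil => simp [pvS]
  | cons e t ih =>
    simp only [List.map_cons, List.foldl_cons, pvS]
    rw [ih, ih ((0 : Int) + _)]
    ring

theorem pvS_nonneg (g : List Int) : 0 ≤ pvS g := by
  induction g with
  | nil => simp [pvS]
  | cons e t ih =>
    have := pvS_foldl t ((0:Int) + (2 + PySem.Int.mod e 2))
    have h := pvMod2 e
    simp only [pvS, List.map_cons, List.foldl_cons] at *
    omega

theorem pvS_toNat_cons (e : Int) (t : List Int) :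
    (pvS (e :: t)).toNat = (2 + PySem.Int.mod e 2).toNat + (pvS t).toNat := by
  have h := pvMod2 e
  have ht := pvS_nonneg t
  have : pvS (e :: t) = (2 + PySem.Int.mod e 2) + pvS t := by
    simp only [pvS, List.map_cons, List.foldl_cons]
    rw [pvS_foldl]
    ring_nf
    rfl
  omega

-- B's fill loop: invariant over the buffer and the write position
theorem fill_invariant (t : List Int) (acc : List Int) :
    ((t.zip (t.map (fun e => 2 + PySem.Int.mod e 2))).foldl
      (fun (st : List Int × Nat) p =>
        let repl := List.replicate p.2.toNat p.1
        (st.1.take st.2 ++ repl ++ st.1.drop (st.2 + p.2.toNat), st.2 + p.2.toNat))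
      (acc ++ List.replicate (pvS t).toNat 0, acc.length)).1 = acc ++ pvF t := by
  induction t generalizing acc with
  | nil => simp [pvS, pvF]
  | cons e u ih =>
    simp only [List.map_cons, List.zip_cons_cons, List.foldl_cons]
    have hc : (pvS (e :: u)).toNat = (2 + PySem.Int.mod e 2).toNat + (pvS u).toNat :=
      pvS_toNat_cons e u
    rw [hc]
    have htake : (acc ++ List.replicate ((2 + PySem.Int.mod e 2).toNat + (pvS u).toNat) 0).take acc.length = acc := by
      simp
    have hdrop : (acc ++ List.replicate ((2 + PySem.Int.mod e 2).toNat + (pvS u).toNat) 0).drop (acc.length + (2 + PySem.Int.mod e 2).toNat) = List.replicate ((pvS u).toNat) 0 := by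
      rw [List.drop_length_add_append]
      simp [List.drop_replicate]
    rw [htake] at *
    simp only [hdrop]
    have := ih (acc ++ List.replicate (2 + PySem.Int.mod e 2).toNat e)
    simp only [List.length_append, List.length_replicate] at this
    rw [this]
    simp [pvF, List.flatMap_cons]

-- ===== VERDICT (by name: the statement is the Claim_ definition above) =====
theorem mal123_spec : Claim_equal_mal123 := by
  intro g _
  unfold Spec_mal123 mal123 mal123_alt
  rw [mal123_foldl]
  have := fill_invariant g []
  simpa [pvS] using this.symm
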